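-- pv_equiv track=rewrite | github.com/rcarton/advent2023 | advent/days/day11.py | get_extra_distance
-- ===== SOURCE A (Python) =====
-- def get_extra_distance(start: int, end: int, empties: list[int]) -> int:
--     start, end = sorted((start, end))
--     extra_distance = 0
--     # Every empty row we cross must count double, they should also be sorted
--     for i in empties:
--         if i < start:
--             continue
--         if i > end:
--             break
--         # Else the row is in between the rows
--         extra_distance += 1
--     return extra_distance
-- ===== SOURCE B (Python) =====
-- def get_extra_distance(start: int, end: int, empties: list[int]) -> int:
--     lo, hi = min(start, end), max(start, end)
--     cut = next((i for i, v in enumerate(empties) if v > hi), len(empties))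
--     return sum(v >= lo for v in empties[:cut])
-- ===== Notes on version B (the rewrite author's own statement) =====
-- stated objective: idiomatic
-- what changed: Replaces the explicit counter loop with continue/break by a truncate-then-count decomposition: locate the first element above the range, slice the list there, and count the in-range elements of the prefix with a comprehension sum.
import Mathlib
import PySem

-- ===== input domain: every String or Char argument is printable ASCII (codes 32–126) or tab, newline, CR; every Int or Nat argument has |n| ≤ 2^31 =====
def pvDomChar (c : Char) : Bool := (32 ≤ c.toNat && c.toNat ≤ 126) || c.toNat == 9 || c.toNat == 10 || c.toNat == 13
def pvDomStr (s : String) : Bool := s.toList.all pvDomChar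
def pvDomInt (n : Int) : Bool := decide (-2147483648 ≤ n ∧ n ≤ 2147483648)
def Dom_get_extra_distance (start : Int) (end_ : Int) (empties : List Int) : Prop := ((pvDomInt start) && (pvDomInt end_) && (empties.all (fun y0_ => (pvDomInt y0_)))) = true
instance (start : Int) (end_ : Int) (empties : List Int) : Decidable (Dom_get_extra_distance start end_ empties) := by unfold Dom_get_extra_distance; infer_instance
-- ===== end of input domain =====

-- B replaces A's counter loop with continue/break by a truncate-then-count decomposition
-- (find the cut at the first element above the range, then count in-range elements of the
-- prefix); objective: idiomatic, same O(n) cost.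

-- ===== PORT A =====
-- A's for-loop: 'continue' on i < start, 'break' on i > end_ (returning the accumulated
-- count so far, here 0 added to the outer accumulation), else count 1.
def pvLoopA (lo hi : Int) : List Int → Int
  | [] => 0
  | i :: rest =>
    if i < lo then pvLoopA lo hi rest
    else if hi < i then 0
    else 1 + pvLoopA lo hi rest

def get_extra_distance (start : Int) (end_ : Int) (empties : List Int) : Int :=
  -- start, end = sorted((start, end))
  let p : Int × Int := if start ≤ end_ then (start, end_) else (end_, start)
  pvLoopA p.1 p.2 empties

-- ===== PORT B =====
def get_extra_distance_alt (start : Int) (end_ : Int) (empties : List Int) : Int :=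
  let lo := min start end_
  let hi := max start end_
  -- cut = next((i for i, v in enumerate(empties) if v > hi), len(empties))
  let cut := (empties.findIdx? (fun v => decide (hi < v))).getD empties.length
  -- sum(v >= lo for v in empties[:cut])
  ((empties.take cut).countP (fun v => decide (lo ≤ v)) : Int)

-- ===== PRECONDITION & SPEC =====
def Spec_get_extra_distance (start : Int) (end_ : Int) (empties : List Int) (out : Int) : Prop := out = get_extra_distance_alt start end_ empties
instance (start : Int) (end_ : Int) (empties : List Int) (out : Int) : Decidable (Spec_get_extra_distance start end_ empties out) := by unfold Spec_get_extra_distance; infer_instance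

-- ===== CLAIM (what is proved, stated in full; the proofs are below) =====
def Claim_equal_get_extra_distance : Prop := ∀ (start : Int) (end_ : Int) (empties : List Int), Dom_get_extra_distance start end_ empties → Spec_get_extra_distance start end_ empties (get_extra_distance start end_ empties)

-- ===== LEMMAS AND PROOFS =====

theorem pvLoopA_eq_count (lo hi : Int) (h : lo ≤ hi) :
    ∀ xs : List Int,
      pvLoopA lo hi xs =
        (((xs.take ((xs.findIdx? (fun v => decide (hi < v))).getD xs.length)).countP
            (fun v => decide (lo ≤ v)) : Nat) : Int)
  | [] => by simp [pvLoopA]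
  | x :: xs => by
    rw [List.findIdx?_cons]
    by_cases hx : hi < x
    · simp only [hx, decide_true, if_true]
      have hxlo : ¬ x < lo := by omega
      simp [pvLoopA, hx, hxlo]
    · simp only [hx, decide_false, Bool.false_eq_true, if_false]
      have htail := pvLoopA_eq_count lo hi h xs
      have hcut : ((Option.map (fun i => i + 1) (xs.findIdx? (fun v => decide (hi < v)))).getD
          (x :: xs).length) = ((xs.findIdx? (fun v => decide (hi < v))).getD xs.length) + 1 := by
        cases hfi : xs.findIdx? (fun v => decide (hi < v)) <;> simp [List.length_cons]
      rw [hcut, List.take_succ_cons, List.countP_cons]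
      by_cases hlt : x < lo
      · have : ¬ lo ≤ x := by omega
        simp [pvLoopA, hlt, this, htail]
      · have hle : lo ≤ x := by omega
        simp [pvLoopA, hlt, hx, hle, htail]
        omega

-- ===== VERDICT (by name: the statement is the Claim_ definition above) =====
theorem get_extra_distance_spec : Claim_equal_get_extra_distance := by
  intro start end_ empties _
  unfold Spec_get_extra_distance get_extra_distance get_extra_distance_alt
  by_cases hse : start ≤ end_
  · have hmin : min start end_ = start := by omega
    have hmax : max start end_ = end_ := by omega
    simp only [hse, if_true, hmin, hmax]
    exact pvLoopA_eq_count start end_ hse empties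
  · have hmin : min start end_ = end_ := by omega
    have hmax : max start end_ = start := by omega
    simp only [hse, if_false, hmin, hmax]
    exact pvLoopA_eq_count end_ start (by omega) empties
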